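-- pv_equiv track=rewrite | github.com/ansApadmanabhan/AdventOfCode | 2024/Puzzle9/Puzzle9.py | compressNones
-- ===== SOURCE A (Python) =====
-- def isChunkNone(chunk):
--     for ii in chunk:
--         if ii is None:
--             return True
--         return False
--
-- def compressNones(copyList):
--     newList = []
--     collectNones = []
--     for ii in copyList:
--         if isChunkNone(ii):
--             collectNones += ii
--         else:
--             newList.append(collectNones)
--             newList.append(ii)
--             collectNones = []
--     if len(collectNones) > 0: newList.append(collectNones)
--     # Remove empties
--     returnList = [ii for ii in newList if len(ii) != 0]
--     return returnList
-- ===== SOURCE B (Python) =====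
-- def compressNones(copyList):
--     def isNoneChunk(c):
--         return len(c) > 0 and c[0] is None
--     out = []
--     i, n = 0, len(copyList)
--     while i < n:
--         c = copyList[i]
--         if isNoneChunk(c):
--             j = i
--             while j < n and isNoneChunk(copyList[j]):
--                 j += 1
--             out.append([x for chunk in copyList[i:j] for x in chunk])
--             i = j
--         else:
--             if c:
--                 out.append(c)
--             i += 1
--     return out
-- ===== Notes on version B (the rewrite author's own statement) =====
-- stated objective: alternative
-- what changed: Replaces A's accumulator/flush loop with trailing-flush and post-hoc empty filtering by a run-extraction scan: each maximal run of None-chunks is located with an inner scan and flattened into one output chunk, non-None chunks are emitted directly if nonempty, so no pending accumulator and no filtering pass exist.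
import Mathlib
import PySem

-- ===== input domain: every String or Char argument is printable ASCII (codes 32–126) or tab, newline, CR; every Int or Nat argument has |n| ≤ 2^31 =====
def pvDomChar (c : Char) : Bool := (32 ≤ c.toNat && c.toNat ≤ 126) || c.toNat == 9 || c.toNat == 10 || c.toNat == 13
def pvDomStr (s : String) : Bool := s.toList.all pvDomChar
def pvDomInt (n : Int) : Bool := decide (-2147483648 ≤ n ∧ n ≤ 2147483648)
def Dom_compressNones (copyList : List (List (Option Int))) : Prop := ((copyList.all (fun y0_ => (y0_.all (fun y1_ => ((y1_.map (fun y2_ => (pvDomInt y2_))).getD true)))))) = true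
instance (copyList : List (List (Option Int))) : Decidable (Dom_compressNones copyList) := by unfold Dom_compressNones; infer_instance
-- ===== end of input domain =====

-- B replaces A's accumulator/flush loop (with trailing flush and a final empty-filter pass)
-- by a run-extraction scan that flattens each maximal run of None-chunks in place (objective: alternative).

-- ===== PORT A =====
-- Python's isChunkNone returns on the first element: True iff the first element is None;
-- on an empty chunk it falls through and returns None (falsy) — ported as false.
def isChunkNone (chunk : List (Option Int)) : Bool :=
  match chunk with
  | [] => false
  | x :: _ => x == none

def compressNones (copyList : List (List (Option Int))) : List (List (Option Int)) :=
  let st := copyList.foldl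
    (fun (st : List (List (Option Int)) × List (Option Int)) ii =>
      if isChunkNone ii then (st.1, st.2 ++ ii)
      else (st.1 ++ [st.2, ii], []))
    ([], [])
  let newList := if st.2.length > 0 then st.1 ++ [st.2] else st.1
  newList.filter (fun ii => ii.length != 0)

-- ===== PORT B =====
-- Source B's 'len(c) > 0 and c[0] is None'
def isNoneChunk (c : List (Option Int)) : Bool :=
  decide (0 < c.length) && (c.getD 0 (some 0) == none)

-- Source B's outer while loop as structural recursion; the inner j-scan is the takeWhile/dropWhile
-- split of the maximal isNoneChunk-run starting at i.
def compressNones_alt : List (List (Option Int)) → List (List (Option Int))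
  | [] => []
  | c :: rest =>
    if h : isNoneChunk c then
      ((c :: rest).takeWhile isNoneChunk).flatten
        :: compressNones_alt ((c :: rest).dropWhile isNoneChunk)
    else
      (if c.isEmpty then [] else [c]) ++ compressNones_alt rest
termination_by l => l.length
decreasing_by
  · simp only [List.dropWhile, h]
    exact Nat.lt_succ_of_le (List.length_dropWhile_le _ _)
  · simp

-- ===== PRECONDITION & SPEC =====
def Spec_compressNones (copyList : List (List (Option Int))) (out : List (List (Option Int))) : Prop := out = compressNones_alt copyList
instance (copyList : List (List (Option Int))) (out : List (List (Option Int))) : Decidable (Spec_compressNones copyList out) := by unfold Spec_compressNones; infer_instance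

-- ===== CLAIM (what is proved, stated in full; the proofs are below) =====
def Claim_equal_compressNones : Prop := ∀ (copyList : List (List (Option Int))), Dom_compressNones copyList → Spec_compressNones copyList (compressNones copyList)

-- ===== LEMMAS AND PROOFS =====

-- the two 'is a None-chunk' tests agree
theorem isNoneChunk_eq (c : List (Option Int)) : isNoneChunk c = isChunkNone c := by
  cases c <;> simp [isNoneChunk, isChunkNone]

-- reference recursion: A's loop seen from a pending accumulator cn
def merge (cn : List (Option Int)) : List (List (Option Int)) → List (List (Option Int))
  | [] => if cn.length = 0 then [] else [cn]
  | c :: rest =>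
    if isChunkNone c then merge (cn ++ c) rest
    else (if cn.length = 0 then [] else [cn]) ++ (if c.length = 0 then [] else [c]) ++ merge [] rest

theorem merge_eq_alt : ∀ (l : List (List (Option Int))),
    (merge [] l = compressNones_alt l) ∧
    (∀ cn : List (Option Int), cn ≠ [] →
      merge cn l = (cn ++ (l.takeWhile isNoneChunk).flatten)
        :: compressNones_alt (l.dropWhile isNoneChunk)) := by
  intro l
  induction l with
  | nil =>
    constructor
    · simp [merge, compressNones_alt]
    · intro cn hcn
      simp [merge, compressNones_alt, List.length_eq_zero_iff, hcn]
  | cons c rest ih =>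
    have hkey := isNoneChunk_eq c
    constructor
    · by_cases h : isChunkNone c
      · -- merge [] (c::rest) = merge c rest; c ≠ [] since isChunkNone c
        have hc : c ≠ [] := by cases c <;> simp_all [isChunkNone]
        rw [merge, if_pos h, List.nil_append]
        rw [compressNones_alt, dif_pos (hkey ▸ h)]
        rw [(ih.2 c hc)]
        simp [List.takeWhile, List.dropWhile, hkey, h]
      · rw [merge, if_neg h]
        rw [compressNones_alt]
        rw [dif_neg (by simp [hkey, h])]
        rw [ih.1]
        simp [List.length_eq_zero_iff, List.isEmpty_iff]
    · intro cn hcn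
      by_cases h : isChunkNone c
      · rw [merge, if_pos h]
        have hcc : cn ++ c ≠ [] := by simp [hcn]
        rw [ih.2 (cn ++ c) hcc]
        simp [List.takeWhile, List.dropWhile, hkey, h, List.append_assoc]
      · rw [merge, if_neg h]
        rw [List.takeWhile, List.dropWhile]
        rw [hkey]
        simp only [h]
        rw [ih.1]
        rw [compressNones_alt, dif_neg (by simp [hkey, h])]
        simp [List.length_eq_zero_iff, hcn, List.isEmpty_iff]

-- A's fold from an arbitrary state, flushed and filtered, is the filtered prefix plus merge
theorem foldA_eq_merge : ∀ (l : List (List (Option Int)))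
    (nl : List (List (Option Int))) (cn : List (Option Int)),
    (let st := l.foldl
        (fun (st : List (List (Option Int)) × List (Option Int)) ii =>
          if isChunkNone ii then (st.1, st.2 ++ ii)
          else (st.1 ++ [st.2, ii], []))
        (nl, cn);
      (if st.2.length > 0 then st.1 ++ [st.2] else st.1).filter (fun ii => ii.length != 0))
    = nl.filter (fun ii => ii.length != 0) ++ merge cn l := by
  intro l
  induction l with
  | nil =>
    intro nl cn
    by_cases h : cn.length = 0
    · simp [merge, List.length_eq_zero_iff.mp h]
    · have : 0 < cn.length := Nat.pos_of_ne_zero h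
      simp [merge, h, this, List.filter_append]
  | cons c rest ih =>
    intro nl cn
    by_cases h : isChunkNone c
    · simp only [List.foldl_cons, h, if_pos]
      exact (ih nl (cn ++ c)).trans (by rw [merge, if_pos h])
    · simp only [List.foldl_cons, h, if_neg, Bool.false_eq_true, not_false_iff]
      rw [ih (nl ++ [cn, c]) []]
      rw [merge, if_neg h]
      rw [List.filter_append, List.append_assoc]
      congr 1
      have hb : ∀ (x : List (Option Int)), x.length ≠ 0 → (x.length != 0) = true :=
        fun x hx => by simpa using hx
      by_cases hcn : cn.length = 0 <;> by_cases hc : c.length = 0 <;>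
        simp [List.filter, hcn, hc, List.length_eq_zero_iff.mp] <;>
        first
          | simp [hb _ hcn, hb _ hc]
          | simp [hb _ hcn]
          | simp [hb _ hc]

-- ===== VERDICT (by name: the statement is the Claim_ definition above) =====
theorem compressNones_spec : Claim_equal_compressNones := by
  intro copyList _
  show compressNones copyList = compressNones_alt copyList
  have h := foldA_eq_merge copyList [] []
  simp only [compressNones]
  rw [h]
  simpa using (merge_eq_alt copyList).1
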